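-- pv_equiv track=rewrite | github.com/smiley-maker/adventofcode2025 | day_four/puzzle_one.py | optimize_forklift_access
-- ===== SOURCE A (Python) =====
-- def optimize_forklift_access(warehouse_grid: list[list[str]]) -> int:
--     """Optimizes forklift access to maximize the number of rolls of paper accessed.
--
--     Args:
--         warehouse_grid (list[list[str]]): 2D grid representing the warehouse layout
--
--     Returns:
--         int: Maximum number of rolls of paper that can be accessed
--     """
--     rows = len(warehouse_grid)
--     cols = len(warehouse_grid[0]) if rows > 0 else 0
--     accessed = [[False for _ in range(cols)] for _ in range(rows)]
--     total_accessed = 0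
--
--     def can_access(r: int, c: int) -> bool:
--         """
--         Checks if the forklift can access the roll at (r, c)
--         based on the current state of accessed rolls.
--         """
--         if warehouse_grid[r][c] != '@' or accessed[r][c]:
--             return False
--         adjacent_rolls = 0
--         for dr in [-1, 0, 1]:
--             for dc in [-1, 0, 1]:
--                 if dr == 0 and dc == 0:
--                     continue
--                 nr, nc = r + dr, c + dc
--                 if 0 <= nr < rows and 0 <= nc < cols:
--                     if warehouse_grid[nr][nc] == '@' and not accessed[nr][nc]:
--                         adjacent_rolls += 1
--         return adjacent_rolls < 4
--
--     # Iteratively access rolls until no more can be accessed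
--     made_progress = True
--     while made_progress:
--         made_progress = False # Reset for this iteration
--         for r in range(rows): # Loop through each cell
--             for c in range(cols): # Loop through each cell
--                 if can_access(r, c): # If we can access this roll
--                     accessed[r][c] = True # Mark it as accessed
--                     total_accessed += 1 # Increment count
--                     made_progress = True # We made progress this iteration which means we need to check again
--
--     return total_accessed
-- ===== SOURCE B (Python) =====
-- OFFSETS = [(-1, -1), (-1, 0), (-1, 1), (0, -1), (0, 1), (1, -1), (1, 0), (1, 1)]
--
--
-- def optimize_forklift_access(warehouse_grid: list[list[str]]) -> int:
--     rows = len(warehouse_grid)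
--     cols = len(warehouse_grid[0]) if rows > 0 else 0
--     rolls = {(r, c) for r in range(rows) for c in range(cols)
--              if warehouse_grid[r][c] == '@'}
--     core = rolls
--     while True:
--         nxt = {(r, c) for (r, c) in core
--                if sum((r + dr, c + dc) in core for dr, dc in OFFSETS) >= 4}
--         if len(nxt) == len(core):
--             break
--         core = nxt
--     return len(rolls) - len(core)
-- ===== Notes on version B (the rewrite author's own statement) =====
-- stated objective: faster
-- what changed: A repeatedly re-sweeps the whole grid, marking accessible cells one at a time in a boolean matrix until a full sweep makes no progress; B builds the set of roll positions once and computes the stable 4-core of that set by synchronous filtering rounds, returning len(rolls) - len(core); they agree because the set removed by peeling is order-independent (confluence), which the Lean proof formalizes.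
import Mathlib
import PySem

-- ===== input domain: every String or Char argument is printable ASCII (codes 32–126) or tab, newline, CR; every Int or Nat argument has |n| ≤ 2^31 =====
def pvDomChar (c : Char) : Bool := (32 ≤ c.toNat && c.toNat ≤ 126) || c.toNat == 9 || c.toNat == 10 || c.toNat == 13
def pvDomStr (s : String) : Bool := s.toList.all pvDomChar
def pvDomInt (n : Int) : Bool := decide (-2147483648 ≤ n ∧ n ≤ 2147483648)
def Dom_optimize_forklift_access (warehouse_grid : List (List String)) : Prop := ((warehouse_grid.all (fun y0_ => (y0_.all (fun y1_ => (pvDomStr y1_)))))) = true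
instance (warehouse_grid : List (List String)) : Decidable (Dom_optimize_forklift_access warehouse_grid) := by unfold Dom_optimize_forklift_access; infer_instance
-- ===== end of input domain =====

set_option maxHeartbeats 1000000


-- B replaces A's repeated whole-grid sweeps over a boolean matrix by synchronous
-- filtering rounds computing the stable 4-core of the roll-position set (alternative
-- algorithm, same return value; agreement rests on order-independence of peeling).

-- ===== PORT A =====
-- warehouse_grid[r][c] (exact under Pre_: every index either comes from range(rows)/range(cols)
-- with all rows at least cols long, or is explicitly bounds-checked first)
def pvGetS (g : List (List String)) (r c : Int) : String :=
  PySem.List.pyGetD (PySem.List.pyGetD g r []) c ""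

-- accessed[r][c] (indices are always in range where A reads it)
def pvGetB (acc : List (List Bool)) (r c : Int) : Bool :=
  PySem.List.pyGetD (PySem.List.pyGetD acc r []) c false

-- accessed[r][c] = True
def pvSetB (acc : List (List Bool)) (r c : Int) : List (List Bool) :=
  PySem.List.pySetD acc r (PySem.List.pySetD (PySem.List.pyGetD acc r []) c true)

-- can_access(r, c)
def pvCanAccess (g : List (List String)) (rows cols : Int) (acc : List (List Bool)) (r c : Int) : Bool :=
  if pvGetS g r c ≠ "@" ∨ pvGetB acc r c then false
  else
    let adj : Int := List.foldl (fun adj dr => List.foldl (fun adj dc =>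
        if dr = (0 : Int) ∧ dc = (0 : Int) then adj
        else
          if 0 ≤ r + dr ∧ r + dr < rows ∧ 0 ≤ c + dc ∧ c + dc < cols ∧
              pvGetS g (r + dr) (c + dc) = "@" ∧ ¬ pvGetB acc (r + dr) (c + dc) then
            adj + 1
          else adj)
        adj [(-1 : Int), 0, 1]) 0 [(-1 : Int), 0, 1]
    decide (adj < 4)

-- one body of the while loop: 'for r in range(rows): for c in range(cols): …'
-- state = (accessed, total_accessed, made_progress)
def pvSweep (g : List (List String)) (rows cols : Int)
    (st : List (List Bool) × Int × Bool) : List (List Bool) × Int × Bool :=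
  (PySem.List.pyRange 0 rows 1).foldl (fun st r =>
    (PySem.List.pyRange 0 cols 1).foldl (fun st c =>
      if pvCanAccess g rows cols st.1 r c then (pvSetB st.1 r c, st.2.1 + 1, true) else st) st) st

-- 'while made_progress': fuel rows*cols+1 provably suffices (every re-entered sweep
-- has removed at least one more cell, and at most rows*cols cells exist)
def pvWhile (g : List (List String)) (rows cols : Int) :
    Nat → List (List Bool) × Int → Int
  | 0, st => st.2
  | fuel + 1, st =>
      let s := pvSweep g rows cols (st.1, st.2, false)
      if s.2.2 then pvWhile g rows cols fuel (s.1, s.2.1) else s.2.1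

def optimize_forklift_access (warehouse_grid : List (List String)) : Int :=
  let rows : Int := warehouse_grid.length
  let cols : Int := if (0 : Int) < rows then ((PySem.List.pyGetD warehouse_grid 0 []).length : Int) else 0
  let accessed := List.replicate rows.toNat (List.replicate cols.toNat false)
  pvWhile warehouse_grid rows cols (rows.toNat * cols.toNat + 1) (accessed, 0)

-- ===== PORT B =====
def pvOffsets : List (Int × Int) :=
  [(-1, -1), (-1, 0), (-1, 1), (0, -1), (0, 1), (1, -1), (1, 0), (1, 1)]

-- {(r, c) for r in range(rows) for c in range(cols) if warehouse_grid[r][c] == '@'}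
def pvRollsList (g : List (List String)) (rows cols : Int) : List (Int × Int) :=
  (PySem.List.pyRange 0 rows 1).flatMap (fun r =>
    (PySem.List.pyRange 0 cols 1).filterMap (fun c =>
      if pvGetS g r c = "@" then some (r, c) else none))

def pvRolls (g : List (List String)) (rows cols : Int) : PySem.Set (Int × Int) :=
  PySem.Set.ofList (pvRollsList g rows cols)

-- sum((r + dr, c + dc) in core for dr, dc in OFFSETS)
def pvDeg (core : PySem.Set (Int × Int)) (p : Int × Int) : Nat :=
  pvOffsets.countP (fun d => core.contains (p.1 + d.1, p.2 + d.2))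

-- 'while True: nxt = {…}; if len(nxt) == len(core): break; core = nxt'
-- fuel len(rolls)+1 provably suffices (each continued round shrinks core)
def pvCoreLoop : Nat → PySem.Set (Int × Int) → PySem.Set (Int × Int)
  | 0, core => core
  | fuel + 1, core =>
      let nxt := PySem.Set.ofList (core.filter (fun p => 4 ≤ pvDeg core p))
      if nxt.length = core.length then core else pvCoreLoop fuel nxt

def optimize_forklift_access_alt (warehouse_grid : List (List String)) : Int :=
  let rows : Int := warehouse_grid.length
  let cols : Int := if (0 : Int) < rows then ((PySem.List.pyGetD warehouse_grid 0 []).length : Int) else 0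
  let rolls := pvRolls warehouse_grid rows cols
  (rolls.length : Int) - ((pvCoreLoop (rolls.length + 1) rolls).length : Int)

-- ===== PRECONDITION & SPEC =====
-- Pre_ excludes exactly the ragged grids on which Python A raises IndexError: some row
-- shorter than row 0 (A indexes every row at all columns 0..len(row 0)-1).
def Pre_optimize_forklift_access (warehouse_grid : List (List String)) : Prop :=
  ∀ row ∈ warehouse_grid, (warehouse_grid.headD []).length ≤ row.length

instance (warehouse_grid : List (List String)) : Decidable (Pre_optimize_forklift_access warehouse_grid) := by
  unfold Pre_optimize_forklift_access; infer_instance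

def pvWitness_optimize_forklift_access : List (List String) :=
  [["@", "@", "."], ["@", "@", "@"], [".", "@", "@"]]

def Spec_optimize_forklift_access (warehouse_grid : List (List String)) (out : Int) : Prop := out = optimize_forklift_access_alt warehouse_grid
instance (warehouse_grid : List (List String)) (out : Int) : Decidable (Spec_optimize_forklift_access warehouse_grid out) := by unfold Spec_optimize_forklift_access; infer_instance

-- ===== CLAIM (what is proved, stated in full; the proofs are below) =====
def Claim_equal_optimize_forklift_access : Prop := ∀ (warehouse_grid : List (List String)), Dom_optimize_forklift_access warehouse_grid → Pre_optimize_forklift_access warehouse_grid → Spec_optimize_forklift_access warehouse_grid (optimize_forklift_access warehouse_grid)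

-- ===== LEMMAS AND PROOFS =====

-- ---- abstract peeling layer ----
def pvDegF (S : Finset (Int × Int)) (p : Int × Int) : Nat :=
  pvOffsets.countP (fun d => decide ((p.1 + d.1, p.2 + d.2) ∈ S))

def pvStep (S T : Finset (Int × Int)) : Prop :=
  ∃ p ∈ S, pvDegF S p < 4 ∧ T = S.erase p

def pvSteps : Finset (Int × Int) → Finset (Int × Int) → Prop :=
  Relation.ReflTransGen pvStep

def pvStuck (S : Finset (Int × Int)) : Prop := ∀ p ∈ S, 4 ≤ pvDegF S p

theorem pvDegF_mono {S T : Finset (Int × Int)} (h : S ⊆ T) (p : Int × Int) :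
    pvDegF S p ≤ pvDegF T p := by
  exact List.countP_mono_left (fun d _ hd => by
    simp only [decide_eq_true_eq] at hd ⊢; exact h hd)

theorem pvStep_subset {S T : Finset (Int × Int)} (h : pvStep S T) : T ⊆ S := by
  obtain ⟨p, _, _, rfl⟩ := h; exact Finset.erase_subset _ _

theorem pvSteps_subset {S T : Finset (Int × Int)} (h : pvSteps S T) : T ⊆ S := by
  induction h with
  | refl => exact Finset.Subset.refl _
  | tail _ hstep ih => exact (pvStep_subset hstep).trans ih

theorem pvSteps_card_le {S T : Finset (Int × Int)} (h : pvSteps S T) : T.card ≤ S.card :=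
  Finset.card_le_card (pvSteps_subset h)

theorem pvCore_steps {C S T : Finset (Int × Int)} (h : pvSteps S T)
    (hCS : C ⊆ S) (hC : ∀ p ∈ C, 4 ≤ pvDegF C p) : C ⊆ T := by
  induction h with
  | refl => exact hCS
  | tail _ hstep ih =>
      obtain ⟨p, hpS, hdeg, rfl⟩ := hstep
      intro q hq
      refine Finset.mem_erase.mpr ⟨?_, ih hq⟩
      rintro rfl
      exact absurd (le_trans (hC q hq) (pvDegF_mono ih q)) (by omega)

theorem pv_confluence {R S T : Finset (Int × Int)} (hS : pvSteps R S) (hT : pvSteps R T)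
    (sS : pvStuck S) (sT : pvStuck T) : S = T := by
  refine Finset.Subset.antisymm ?_ ?_
  · exact pvCore_steps hT (pvSteps_subset hS) sS
  · exact pvCore_steps hS (pvSteps_subset hT) sT

theorem pv_serial_aux (n : Nat) : ∀ (S U : Finset (Int × Int)), U.card ≤ n → U ⊆ S →
    (∀ p ∈ U, pvDegF S p < 4) → pvSteps S (S \ U) := by
  induction n with
  | zero =>
      intro S U hcard _ _
      have : U = ∅ := Finset.card_eq_zero.mp (Nat.le_zero.mp hcard)
      subst this
      simpa using Relation.ReflTransGen.refl
  | succ n ih =>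
      intro S U hcard hUS hdeg
      rcases U.eq_empty_or_nonempty with rfl | ⟨p, hp⟩
      · simpa using Relation.ReflTransGen.refl
      · have hstep : pvStep S (S.erase p) := ⟨p, hUS hp, hdeg p hp, rfl⟩
        have htail : pvSteps (S.erase p) ((S.erase p) \ (U.erase p)) := by
          refine ih (S.erase p) (U.erase p) ?_ ?_ ?_
          · have := Finset.card_erase_of_mem hp
            omega
          · exact fun q hq => Finset.mem_erase.mpr
              ⟨(Finset.mem_erase.mp hq).1, hUS (Finset.mem_erase.mp hq).2⟩
          · exact fun q hq => lt_of_le_of_lt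
              (pvDegF_mono (Finset.erase_subset _ _) q) (hdeg q (Finset.mem_erase.mp hq).2)
        have heq : (S.erase p) \ (U.erase p) = S \ U := by
          ext q
          simp only [Finset.mem_sdiff, Finset.mem_erase]
          constructor
          · rintro ⟨⟨hqp, hqS⟩, hnot⟩
            exact ⟨hqS, fun hqU => hnot ⟨hqp, hqU⟩⟩
          · rintro ⟨hqS, hqU⟩
            exact ⟨⟨fun h => hqU (h ▸ hp), hqS⟩, fun h => hqU h.2⟩
        exact Relation.ReflTransGen.head hstep (heq ▸ htail)

theorem pv_serial {S U : Finset (Int × Int)} (hUS : U ⊆ S)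
    (hdeg : ∀ p ∈ U, pvDegF S p < 4) : pvSteps S (S \ U) :=
  pv_serial_aux U.card S U le_rfl hUS hdeg

-- ---- shared: the roll set ----
def pvRollsF (g : List (List String)) (rows cols : Int) : Finset (Int × Int) :=
  (pvRollsList g rows cols).toFinset

theorem mem_pvRollsList {g : List (List String)} {rows cols : Int} {p : Int × Int} :
    p ∈ pvRollsList g rows cols ↔
      0 ≤ p.1 ∧ p.1 < rows ∧ 0 ≤ p.2 ∧ p.2 < cols ∧ pvGetS g p.1 p.2 = "@" := by
  obtain ⟨a, b⟩ := p
  simp only [pvRollsList, List.mem_flatMap, List.mem_filterMap, PySem.List.mem_pyRange_one]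
  constructor
  · rintro ⟨r, ⟨hr0, hr1⟩, c, ⟨hc0, hc1⟩, hif⟩
    split at hif
    · cases hif; exact ⟨hr0, hr1, hc0, hc1, by assumption⟩
    · cases hif
  · rintro ⟨h1, h2, h3, h4, h5⟩
    exact ⟨a, ⟨h1, h2⟩, b, ⟨h3, h4⟩, by simp [h5]⟩

theorem mem_pvRollsF {g : List (List String)} {rows cols : Int} {p : Int × Int} :
    p ∈ pvRollsF g rows cols ↔
      0 ≤ p.1 ∧ p.1 < rows ∧ 0 ≤ p.2 ∧ p.2 < cols ∧ pvGetS g p.1 p.2 = "@" := by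
  rw [pvRollsF, List.mem_toFinset, mem_pvRollsList]



-- ---- A-side: relating the boolean matrix to the alive set ----
def pvShape (rows cols : Int) (acc : List (List Bool)) : Prop :=
  acc.length = rows.toNat ∧ ∀ row ∈ acc, row.length = cols.toNat

def pvAliveA (g : List (List String)) (rows cols : Int) (acc : List (List Bool)) :
    Finset (Int × Int) :=
  (pvRollsF g rows cols).filter (fun p => pvGetB acc p.1 p.2 = false)

theorem mem_pvAliveA {g : List (List String)} {rows cols : Int} {acc : List (List Bool)}
    {p : Int × Int} :
    p ∈ pvAliveA g rows cols acc ↔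
      (0 ≤ p.1 ∧ p.1 < rows ∧ 0 ≤ p.2 ∧ p.2 < cols ∧ pvGetS g p.1 p.2 = "@")
        ∧ pvGetB acc p.1 p.2 = false := by
  rw [pvAliveA, Finset.mem_filter, mem_pvRollsF]

theorem pvGetB_setB {rows cols : Int} {acc : List (List Bool)} (hsh : pvShape rows cols acc)
    {r c r' c' : Int} (hr : 0 ≤ r ∧ r < rows) (hc : 0 ≤ c ∧ c < cols)
    (hr' : 0 ≤ r' ∧ r' < rows) (hc' : 0 ≤ c' ∧ c' < cols) :
    pvGetB (pvSetB acc r c) r' c' = if r' = r ∧ c' = c then true else pvGetB acc r' c' := by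
  obtain ⟨hlen, hrow⟩ := hsh
  have hn : r.toNat < acc.length := by omega
  have hrcast : (r.toNat : Int) = r := Int.toNat_of_nonneg hr.1
  have hmcast : (r'.toNat : Int) = r' := Int.toNat_of_nonneg hr'.1
  have hccast : (c.toNat : Int) = c := Int.toNat_of_nonneg hc.1
  have hc'cast : (c'.toNat : Int) = c' := Int.toNat_of_nonneg hc'.1
  have hrowmem : PySem.List.pyGetD acc r [] ∈ acc := by
    rw [← hrcast, PySem.List.pyGetD_natCast, List.getD_eq_getElem _ _ hn]
    exact List.getElem_mem hn
  have hcn : c.toNat < (PySem.List.pyGetD acc r []).length := by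
    have := hrow _ hrowmem; omega
  simp only [pvGetB, pvSetB]
  rw [← hrcast, ← hmcast, ← hccast, ← hc'cast]
  simp only [Nat.cast_inj]
  have hcn' : c.toNat < (PySem.List.pyGetD acc (r.toNat : Int) []).length := by
    rw [hrcast]; exact hcn
  rw [PySem.List.pyGetD_pySetD_natCast _ _ _ _ _ hn]
  by_cases hm : r'.toNat = r.toNat
  · rw [if_pos hm, PySem.List.pyGetD_pySetD_natCast _ _ _ _ _ hcn']
    by_cases hcc : c'.toNat = c.toNat
    · simp [hm, hcc]
    · simp [hm, hcc]
  · simp [hm]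

theorem pvShape_setB {rows cols : Int} {acc : List (List Bool)} (hsh : pvShape rows cols acc)
    {r c : Int} (hr : 0 ≤ r ∧ r < rows) (hc : 0 ≤ c ∧ c < cols) :
    pvShape rows cols (pvSetB acc r c) := by
  obtain ⟨hlen, hrow⟩ := hsh
  have hn : r.toNat < acc.length := by omega
  have hrcast : (r.toNat : Int) = r := Int.toNat_of_nonneg hr.1
  have hccast : (c.toNat : Int) = c := Int.toNat_of_nonneg hc.1
  have hset : pvSetB acc r c
      = acc.set r.toNat (PySem.List.pySetD (PySem.List.pyGetD acc r []) c true) := by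
    rw [pvSetB, ← hrcast, PySem.List.pySetD, PySem.List.pySet?_natCast _ _ _ hn]
    rfl
  have hrowmem : PySem.List.pyGetD acc r [] ∈ acc := by
    rw [← hrcast, PySem.List.pyGetD_natCast, List.getD_eq_getElem _ _ hn]
    exact List.getElem_mem hn
  have hcn : c.toNat < (PySem.List.pyGetD acc r []).length := by
    have := hrow _ hrowmem; omega
  constructor
  · rw [hset]; simpa using hlen
  · intro row hmem
    rw [hset] at hmem
    rcases List.mem_or_eq_of_mem_set hmem with h | h
    · exact hrow _ h
    · subst h
      rw [PySem.List.pySetD, ← hccast, PySem.List.pySet?_natCast _ _ _ hcn]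
      simpa using hrow _ hrowmem

theorem pvAliveA_setB {g : List (List String)} {rows cols : Int} {acc : List (List Bool)}
    (hsh : pvShape rows cols acc) {r c : Int} (hr : 0 ≤ r ∧ r < rows) (hc : 0 ≤ c ∧ c < cols) :
    pvAliveA g rows cols (pvSetB acc r c) = (pvAliveA g rows cols acc).erase (r, c) := by
  ext q
  rw [mem_pvAliveA, Finset.mem_erase, mem_pvAliveA]
  by_cases hq : 0 ≤ q.1 ∧ q.1 < rows ∧ 0 ≤ q.2 ∧ q.2 < cols
  · rw [pvGetB_setB hsh hr hc ⟨hq.1, hq.2.1⟩ ⟨hq.2.2.1, hq.2.2.2⟩]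
    by_cases hqe : q = (r, c)
    · subst hqe; simp
    · have : ¬ (q.1 = r ∧ q.2 = c) := by
        intro h; exact hqe (Prod.ext h.1 h.2)
      simp only [this, if_false]
      tauto
  · constructor
    · rintro ⟨h1, _⟩; exact absurd ⟨h1.1, h1.2.1, h1.2.2.1, h1.2.2.2.1⟩ hq
    · rintro ⟨_, h1, _⟩; exact absurd ⟨h1.1, h1.2.1, h1.2.2.1, h1.2.2.2.1⟩ hq

-- the double for-loop over [-1,0,1]×[-1,0,1] counts exactly the offsets satisfying C
theorem pv_adj_count (C : Int → Int → Prop) [∀ a b : Int, Decidable (C a b)] (a0 : Int) :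
    List.foldl (fun adj dr => List.foldl (fun adj dc =>
        if dr = (0 : Int) ∧ dc = (0 : Int) then adj
        else if C dr dc then adj + 1 else adj)
      adj [(-1 : Int), 0, 1]) a0 [(-1 : Int), 0, 1]
    = a0 + (pvOffsets.countP (fun d => decide (C d.1 d.2)) : Int) := by
  rw [← PySem.List.sum_map_ite_one_zero]
  simp only [List.foldl_cons, List.foldl_nil, pvOffsets, List.map_cons, List.map_nil,
    List.sum_cons, List.sum_nil]
  norm_num
  split_ifs <;> omega

theorem pvCanAccess_iff {g : List (List String)} {rows cols : Int} {acc : List (List Bool)}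
    {r c : Int} (hr : 0 ≤ r ∧ r < rows) (hc : 0 ≤ c ∧ c < cols) :
    pvCanAccess g rows cols acc r c = true ↔
      ((r, c) ∈ pvAliveA g rows cols acc
        ∧ pvDegF (pvAliveA g rows cols acc) (r, c) < 4) := by
  have hmem : (r, c) ∈ pvAliveA g rows cols acc ↔
      (pvGetS g r c = "@" ∧ pvGetB acc r c = false) := by
    rw [mem_pvAliveA]
    constructor
    · rintro ⟨⟨_, _, _, _, h5⟩, h6⟩; exact ⟨h5, h6⟩
    · rintro ⟨h5, h6⟩; exact ⟨⟨hr.1, hr.2, hc.1, hc.2, h5⟩, h6⟩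
  have hcnt : (pvOffsets.countP (fun d =>
        decide (0 ≤ r + d.1 ∧ r + d.1 < rows ∧ 0 ≤ c + d.2 ∧ c + d.2 < cols ∧
          pvGetS g (r + d.1) (c + d.2) = "@" ∧ ¬ pvGetB acc (r + d.1) (c + d.2) = true)))
      = pvDegF (pvAliveA g rows cols acc) (r, c) := by
    apply List.countP_congr
    intro d _
    simp only [decide_eq_true_iff, mem_pvAliveA, Bool.not_eq_true]
    tauto
  by_cases hcond : pvGetS g r c ≠ "@" ∨ pvGetB acc r c = true
  · have hfalse : pvCanAccess g rows cols acc r c = false := by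
      rw [pvCanAccess, if_pos (by simpa using hcond)]
    rw [hfalse]
    simp only [Bool.false_eq_true, false_iff]
    rintro ⟨hm, _⟩
    rw [hmem] at hm
    rcases hcond with h | h
    · exact h hm.1
    · rw [hm.2] at h; cases h
  · have hcond1 : pvGetS g r c = "@" := by
      by_contra h; exact hcond (Or.inl h)
    have hcond2 : pvGetB acc r c = false := by
      cases hgb : pvGetB acc r c
      · rfl
      · exact absurd (Or.inr hgb) hcond
    have hcond' : pvGetS g r c = "@" ∧ pvGetB acc r c = false := ⟨hcond1, hcond2⟩
    rw [pvCanAccess, if_neg (by simp [hcond1, hcond2])]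
    show decide _ = true ↔ _
    rw [pv_adj_count (fun dr dc => 0 ≤ r + dr ∧ r + dr < rows ∧ 0 ≤ c + dc ∧ c + dc < cols ∧
          pvGetS g (r + dr) (c + dc) = "@" ∧ ¬ pvGetB acc (r + dr) (c + dc) = true) 0]
    rw [hcnt]
    have hm : (r, c) ∈ pvAliveA g rows cols acc := hmem.mpr hcond'
    simp only [decide_eq_true_eq, hm, true_and]
    omega

-- nested for-loops as one fold over the flattened cell list
def pvCells (rows cols : Int) : List (Int × Int) :=
  (PySem.List.pyRange 0 rows 1).flatMap (fun r =>
    (PySem.List.pyRange 0 cols 1).map (fun c => (r, c)))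

theorem mem_pvCells {rows cols : Int} {p : Int × Int} :
    p ∈ pvCells rows cols ↔ 0 ≤ p.1 ∧ p.1 < rows ∧ 0 ≤ p.2 ∧ p.2 < cols := by
  obtain ⟨a, b⟩ := p
  simp only [pvCells, List.mem_flatMap, List.mem_map, PySem.List.mem_pyRange_one, Prod.mk.injEq]
  constructor
  · rintro ⟨r, hr, cc, hcc, rfl, rfl⟩; exact ⟨hr.1, hr.2, hcc.1, hcc.2⟩
  · rintro ⟨h1, h2, h3, h4⟩; exact ⟨a, ⟨h1, h2⟩, b, ⟨h3, h4⟩, rfl, rfl⟩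

def pvBody (g : List (List String)) (rows cols : Int)
    (st : List (List Bool) × Int × Bool) (p : Int × Int) : List (List Bool) × Int × Bool :=
  if pvCanAccess g rows cols st.1 p.1 p.2 then (pvSetB st.1 p.1 p.2, st.2.1 + 1, true) else st

theorem pv_foldl_foldl {s : Type} (f : s → (Int × Int) → s) (l1 l2 : List Int) :
    ∀ a : s, l1.foldl (fun a r => l2.foldl (fun a c => f a (r, c)) a) a
      = (l1.flatMap (fun r => l2.map (fun c => (r, c)))).foldl f a := by
  induction l1 with
  | nil => intro a; simp
  | cons r t ih =>
      intro a
      simp only [List.foldl_cons, List.flatMap_cons, List.foldl_append, List.foldl_map, ih]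

theorem pvSweep_eq_fold (g : List (List String)) (rows cols : Int)
    (st : List (List Bool) × Int × Bool) :
    pvSweep g rows cols st = (pvCells rows cols).foldl (pvBody g rows cols) st := by
  rw [pvSweep, pvCells, ← pv_foldl_foldl (pvBody g rows cols)]
  rfl

theorem pv_fold_run {g : List (List String)} {rows cols : Int}
    (L : List (Int × Int)) (hL : ∀ p ∈ L, 0 ≤ p.1 ∧ p.1 < rows ∧ 0 ≤ p.2 ∧ p.2 < cols) :
    ∀ st : List (List Bool) × Int × Bool, pvShape rows cols st.1 →
      pvShape rows cols (L.foldl (pvBody g rows cols) st).1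
      ∧ pvSteps (pvAliveA g rows cols st.1) (pvAliveA g rows cols (L.foldl (pvBody g rows cols) st).1)
      ∧ (L.foldl (pvBody g rows cols) st).2.1
          = st.2.1 + ((pvAliveA g rows cols st.1).card : Int)
              - ((pvAliveA g rows cols (L.foldl (pvBody g rows cols) st).1).card : Int)
      ∧ (st.2.2 = true → (L.foldl (pvBody g rows cols) st).2.2 = true)
      ∧ ((L.foldl (pvBody g rows cols) st).2.2 = false →
          L.foldl (pvBody g rows cols) st = st
            ∧ ∀ p ∈ L, pvCanAccess g rows cols st.1 p.1 p.2 = false)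
      ∧ (st.2.2 = false → (L.foldl (pvBody g rows cols) st).2.2 = true →
          ((pvAliveA g rows cols (L.foldl (pvBody g rows cols) st).1).card
            < (pvAliveA g rows cols st.1).card)) := by
  induction L with
  | nil =>
      intro st hsh
      refine ⟨hsh, Relation.ReflTransGen.refl, by simp only [List.foldl_nil]; omega,
        fun h => h, fun _ => ⟨rfl, fun p hp => by cases hp⟩,
        fun h1 h2 => by simp only [List.foldl_nil] at h2; rw [h1] at h2; cases h2⟩
  | cons p t ih =>
      intro st hsh
      have hp := hL p List.mem_cons_self
      have hLt : ∀ q ∈ t, 0 ≤ q.1 ∧ q.1 < rows ∧ 0 ≤ q.2 ∧ q.2 < cols :=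
        fun q hq => hL q (List.mem_cons_of_mem _ hq)
      rw [List.foldl_cons]
      by_cases hcan : pvCanAccess g rows cols st.1 p.1 p.2 = true
      · have hmd := (pvCanAccess_iff ⟨hp.1, hp.2.1⟩ ⟨hp.2.2.1, hp.2.2.2⟩).mp hcan
        rw [Prod.mk.eta] at hmd
        have hbody : pvBody g rows cols st p = (pvSetB st.1 p.1 p.2, st.2.1 + 1, true) := by
          rw [pvBody, if_pos hcan]
        have hsh' : pvShape rows cols (pvSetB st.1 p.1 p.2) :=
          pvShape_setB hsh ⟨hp.1, hp.2.1⟩ ⟨hp.2.2.1, hp.2.2.2⟩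
        have halive : pvAliveA g rows cols (pvSetB st.1 p.1 p.2)
            = (pvAliveA g rows cols st.1).erase p := by
          rw [pvAliveA_setB hsh ⟨hp.1, hp.2.1⟩ ⟨hp.2.2.1, hp.2.2.2⟩, Prod.mk.eta]
        have hstep : pvStep (pvAliveA g rows cols st.1)
            (pvAliveA g rows cols (pvSetB st.1 p.1 p.2)) :=
          ⟨p, hmd.1, hmd.2, halive⟩
        have hcard : ((pvAliveA g rows cols (pvSetB st.1 p.1 p.2)).card : Int)
            = ((pvAliveA g rows cols st.1).card : Int) - 1 := by
          rw [halive, Finset.card_erase_of_mem hmd.1]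
          have : 0 < (pvAliveA g rows cols st.1).card := Finset.card_pos.mpr ⟨p, hmd.1⟩
          omega
        obtain ⟨A1, A2, A3, A4, A5, A6⟩ := ih hLt (pvSetB st.1 p.1 p.2, st.2.1 + 1, true) hsh'
        dsimp only at A1 A2 A3 A4 A5 A6
        rw [hbody]
        refine ⟨A1, Relation.ReflTransGen.head hstep A2, by omega, fun _ => A4 rfl, ?_, ?_⟩
        · intro hres
          rw [A4 rfl] at hres; cases hres
        · intro _ _
          have h1 := pvSteps_card_le A2
          omega
      · have hbody : pvBody g rows cols st p = st := by
          rw [pvBody, if_neg hcan]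
        rw [hbody]
        obtain ⟨A1, A2, A3, A4, A5, A6⟩ := ih hLt st hsh
        refine ⟨A1, A2, A3, A4, ?_, A6⟩
        intro hres
        obtain ⟨heq, hall⟩ := A5 hres
        refine ⟨heq, fun q hq => ?_⟩
        rcases List.mem_cons.mp hq with rfl | hq'
        · exact Bool.eq_false_iff.mpr hcan
        · exact hall q hq'

theorem pv_while_run {g : List (List String)} {rows cols : Int} :
    ∀ (fuel : Nat) (acc : List (List Bool)) (total : Int), pvShape rows cols acc →
      (pvAliveA g rows cols acc).card < fuel →
      ∃ S, pvSteps (pvAliveA g rows cols acc) S ∧ pvStuck S ∧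
        pvWhile g rows cols fuel (acc, total)
          = total + ((pvAliveA g rows cols acc).card : Int) - (S.card : Int) := by
  intro fuel
  induction fuel with
  | zero => intro acc total _ hcard; exact absurd hcard (Nat.not_lt_zero _)
  | succ n ih =>
      intro acc total hsh hcard
      have hwhile : pvWhile g rows cols (n + 1) (acc, total)
          = if (pvSweep g rows cols (acc, total, false)).2.2
            then pvWhile g rows cols n ((pvSweep g rows cols (acc, total, false)).1,
              (pvSweep g rows cols (acc, total, false)).2.1)
            else (pvSweep g rows cols (acc, total, false)).2.1 := rfl
      rw [hwhile, pvSweep_eq_fold]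
      obtain ⟨A1, A2, A3, A4, A5, A6⟩ :=
        pv_fold_run (pvCells rows cols) (fun p hp => mem_pvCells.mp hp) (acc, total, false) hsh
      dsimp only at A1 A2 A3 A4 A5 A6
      by_cases hprog : (List.foldl (pvBody g rows cols) (acc, total, false) (pvCells rows cols)).2.2 = true
      · rw [if_pos hprog]
        have hlt := A6 rfl hprog
        obtain ⟨S, s1, s2, s3⟩ := ih _ _ A1 (by omega)
        refine ⟨S, Relation.ReflTransGen.trans A2 s1, s2, ?_⟩
        rw [s3]
        omega
      · rw [if_neg hprog]
        obtain ⟨heq, hall⟩ := A5 (Bool.eq_false_iff.mpr hprog)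
        refine ⟨pvAliveA g rows cols acc, Relation.ReflTransGen.refl, ?_, ?_⟩
        · intro q hq
          have hqr := mem_pvAliveA.mp hq
          have hqc : q ∈ pvCells rows cols :=
            mem_pvCells.mpr ⟨hqr.1.1, hqr.1.2.1, hqr.1.2.2.1, hqr.1.2.2.2.1⟩
          have hfalse := hall q hqc
          have hiff := pvCanAccess_iff (g := g) (acc := acc)
            ⟨hqr.1.1, hqr.1.2.1⟩ ⟨hqr.1.2.2.1, hqr.1.2.2.2.1⟩
          rw [Prod.mk.eta] at hiff
          by_contra hlt4
          have := hiff.mpr ⟨hq, by omega⟩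
          rw [hfalse] at this
          cases this
        · have hres1 : (List.foldl (pvBody g rows cols) (acc, total, false) (pvCells rows cols)).2.1 = total := by
            rw [heq]
          omega

-- ---- initial state ----
theorem pvGetB_allFalse : ∀ (l : List (List Bool)), (∀ row ∈ l, ∀ x ∈ row, x = false) →
    ∀ r c, pvGetB l r c = false := by
  intro l hl r c
  rw [pvGetB, PySem.List.pyGetD, PySem.List.pyGetD]
  cases h : PySem.List.pyGet? l r with
  | none =>
      have h0 : PySem.List.pyGet? ([] : List Bool) c = none := by
        rw [PySem.List.pyGet?_eq_none_iff]; simp [PySem.Raise.InRange]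
      simp [h0]
  | some row =>
      simp only [Option.getD_some]
      cases h2 : PySem.List.pyGet? row c with
      | none => simp
      | some x =>
          simp only [Option.getD_some]
          exact hl row (PySem.List.mem_of_pyGet?_eq_some _ h) x
            (PySem.List.mem_of_pyGet?_eq_some _ h2)

theorem pvGetB_init (R C : Nat) (r c : Int) :
    pvGetB (List.replicate R (List.replicate C false)) r c = false := by
  apply pvGetB_allFalse
  intro row hrow x hx
  rw [List.eq_of_mem_replicate hrow] at hx
  exact List.eq_of_mem_replicate hx

theorem pvRollsList_length_le (g : List (List String)) (rows cols : Int) :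
    (pvRollsList g rows cols).length ≤ rows.toNat * cols.toNat := by
  rw [pvRollsList, List.length_flatMap]
  have hbound : ∀ x ∈ (PySem.List.pyRange 0 rows 1).map (fun r =>
      ((PySem.List.pyRange 0 cols 1).filterMap (fun c =>
        if pvGetS g r c = "@" then some (r, c) else none)).length), x ≤ cols.toNat := by
    intro x hx
    obtain ⟨r, _, rfl⟩ := List.mem_map.mp hx
    calc ((PySem.List.pyRange 0 cols 1).filterMap _).length
        ≤ (PySem.List.pyRange 0 cols 1).length := List.length_filterMap_le _ _
      _ = cols.toNat := by rw [PySem.List.length_pyRange_one]; omega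
  calc _ ≤ _ := List.sum_le_card_nsmul _ cols.toNat hbound
    _ = rows.toNat * cols.toNat := by
        simp [PySem.List.length_pyRange_one, smul_eq_mul]

theorem pv_A_repr (g : List (List String)) (rows cols : Int)
    (hrows : rows = (g.length : Int))
    (hcols : cols = if (0 : Int) < (g.length : Int) then ((PySem.List.pyGetD g 0 []).length : Int) else 0) :
    ∃ S, pvSteps (pvRollsF g rows cols) S ∧ pvStuck S ∧
      optimize_forklift_access g = ((pvRollsF g rows cols).card : Int) - (S.card : Int) := by
  have hval : optimize_forklift_access g
      = pvWhile g rows cols (rows.toNat * cols.toNat + 1)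
          (List.replicate rows.toNat (List.replicate cols.toNat false), 0) := by
    subst hrows; subst hcols; rfl
  have hsh : pvShape rows cols (List.replicate rows.toNat (List.replicate cols.toNat false)) := by
    refine ⟨by simp, ?_⟩
    intro row h
    rw [List.eq_of_mem_replicate h]
    simp
  have halive : pvAliveA g rows cols (List.replicate rows.toNat (List.replicate cols.toNat false))
      = pvRollsF g rows cols := by
    apply Finset.ext
    intro q
    rw [mem_pvAliveA, mem_pvRollsF]
    simp [pvGetB_init]
  have hcard : (pvAliveA g rows cols (List.replicate rows.toNat (List.replicate cols.toNat false))).card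
      < rows.toNat * cols.toNat + 1 := by
    rw [halive, pvRollsF]
    have h1 := List.toFinset_card_le (pvRollsList g rows cols)
    have h2 := pvRollsList_length_le g rows cols
    omega
  obtain ⟨S, s1, s2, s3⟩ := pv_while_run (rows.toNat * cols.toNat + 1) _ 0 hsh hcard
  rw [halive] at s1 s3
  exact ⟨S, s1, s2, by rw [hval, s3]; omega⟩

-- ---- B-side ----
theorem pvSet_ofList_aux {α : Type} [BEq α] [LawfulBEq α] :
    ∀ (l s : List α), l.Nodup → (∀ x ∈ l, x ∉ s) → List.foldl PySem.Set.add s l = s ++ l := by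
  intro l
  induction l with
  | nil => intro s _ _; simp
  | cons x t ih =>
      intro s hnd hdisj
      have hx : x ∉ s := hdisj x (by simp)
      have : PySem.Set.add s x = s ++ [x] := by
        simp [PySem.Set.add, List.contains_eq_mem, hx]
      rw [List.foldl_cons, this, ih (s ++ [x]) (List.nodup_cons.mp hnd).2 ?_]
      · simp
      · intro y hy
        simp only [List.mem_append, List.mem_singleton]
        rintro (h | rfl)
        · exact hdisj y (by simp [hy]) h
        · exact (List.nodup_cons.mp hnd).1 hy

theorem pvSet_ofList_eq_self {α : Type} [BEq α] [LawfulBEq α] (l : List α) (h : l.Nodup) :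
    PySem.Set.ofList l = l := by
  have := pvSet_ofList_aux (α := α) l [] h (by simp)
  simpa [PySem.Set.ofList, PySem.Set.empty] using this

theorem pvDeg_eq_degF (core : List (Int × Int)) (p : Int × Int) :
    pvDeg core p = pvDegF core.toFinset p := by
  apply List.countP_congr
  intro d _
  simp [List.contains_eq_mem, List.mem_toFinset]

theorem pv_coreLoop_run :
    ∀ (fuel : Nat) (core : List (Int × Int)), core.Nodup → core.length < fuel →
      (pvCoreLoop fuel core).Nodup
      ∧ pvSteps core.toFinset (pvCoreLoop fuel core).toFinset
      ∧ pvStuck (pvCoreLoop fuel core).toFinset := by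
  intro fuel
  induction fuel with
  | zero => intro core _ hlen; exact absurd hlen (Nat.not_lt_zero _)
  | succ n ih =>
      intro core hnd hlen
      have hfn : (core.filter (fun p => decide (4 ≤ pvDeg core p))).Nodup := hnd.filter _
      have hofl : PySem.Set.ofList (core.filter (fun p => decide (4 ≤ pvDeg core p)))
          = core.filter (fun p => decide (4 ≤ pvDeg core p)) := pvSet_ofList_eq_self _ hfn
      have hred : pvCoreLoop (n + 1) core
          = if (PySem.Set.ofList (core.filter (fun p => decide (4 ≤ pvDeg core p)))).length
              = core.length
            then core
            else pvCoreLoop n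
              (PySem.Set.ofList (core.filter (fun p => decide (4 ≤ pvDeg core p)))) := rfl
      rw [hred, hofl]
      by_cases hl : (core.filter (fun p => decide (4 ≤ pvDeg core p))).length = core.length
      · rw [if_pos hl]
        have heqf : core.filter (fun p => decide (4 ≤ pvDeg core p)) = core :=
          List.filter_sublist.eq_of_length hl
        have hall := List.filter_eq_self.mp heqf
        refine ⟨hnd, Relation.ReflTransGen.refl, ?_⟩
        intro p hp
        have := hall p (List.mem_toFinset.mp hp)
        rw [← pvDeg_eq_degF]
        simpa using this
      · rw [if_neg hl]
        have hlt : (core.filter (fun p => decide (4 ≤ pvDeg core p))).length < core.length :=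
          lt_of_le_of_ne List.filter_sublist.length_le hl
        obtain ⟨B1, B2, B3⟩ := ih _ hfn (by omega)
        refine ⟨B1, Relation.ReflTransGen.trans ?_ B2, B3⟩
        have hU : (core.filter (fun p => decide (4 ≤ pvDeg core p))).toFinset
            = core.toFinset \ core.toFinset.filter (fun p => pvDegF core.toFinset p < 4) := by
          rw [List.toFinset_filter, ← Finset.filter_not]
          apply Finset.filter_congr
          intro p _
          rw [← pvDeg_eq_degF]
          simp [not_lt]
        rw [hU]
        exact pv_serial (Finset.filter_subset _ _) (fun p hp => (Finset.mem_filter.mp hp).2)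

theorem pv_B_repr (g : List (List String)) (rows cols : Int)
    (hrows : rows = (g.length : Int))
    (hcols : cols = if (0 : Int) < (g.length : Int) then ((PySem.List.pyGetD g 0 []).length : Int) else 0) :
    ∃ S, pvSteps (pvRollsF g rows cols) S ∧ pvStuck S ∧
      optimize_forklift_access_alt g = ((pvRollsF g rows cols).card : Int) - (S.card : Int) := by
  have hval : optimize_forklift_access_alt g
      = ((pvRolls g rows cols).length : Int)
        - ((pvCoreLoop ((pvRolls g rows cols).length + 1) (pvRolls g rows cols)).length : Int) := by
    subst hrows; subst hcols; rfl
  have hnd : (pvRolls g rows cols).Nodup := PySem.Set.nodup_ofList _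
  have htf : (pvRolls g rows cols).toFinset = pvRollsF g rows cols := by
    apply Finset.ext
    intro q
    simp [pvRolls, pvRollsF, PySem.Set.mem_ofList, List.mem_toFinset]
  obtain ⟨B1, B2, B3⟩ :=
    pv_coreLoop_run ((pvRolls g rows cols).length + 1) (pvRolls g rows cols) hnd (by omega)
  refine ⟨(pvCoreLoop ((pvRolls g rows cols).length + 1) (pvRolls g rows cols)).toFinset,
    ?_, B3, ?_⟩
  · rw [← htf]; exact B2
  · rw [hval, ← htf, List.toFinset_card_of_nodup hnd, List.toFinset_card_of_nodup B1]

-- ===== VERDICT (by name: the statement is the Claim_ definition above) =====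
theorem optimize_forklift_access_spec : Claim_equal_optimize_forklift_access := by
  intro g _ _
  unfold Spec_optimize_forklift_access
  obtain ⟨SA, hA1, hA2, hA3⟩ := pv_A_repr g _ _ rfl rfl
  obtain ⟨SB, hB1, hB2, hB3⟩ := pv_B_repr g _ _ rfl rfl
  rw [hA3, hB3, pv_confluence hA1 hB1 hA2 hB2]
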